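-- pv_equiv track=rewrite | github.com/JungHanLeee/Algorithm | programmers/Level1/부족한 금액 계산하기.py | solution
-- ===== SOURCE A (Python) =====
-- def solution(input_price, money, count):
--     for i in range(1,count+1):
--         price=input_price*i
--         money=money-price
--     if money<0:
--         money=abs(money)
--     else:
--         money=0
--     return money
-- ===== SOURCE B (Python) =====
-- def solution(input_price, money, count):
--     c = count if count > 0 else 0
--     total = input_price * (c * (c + 1) // 2)
--     return max(0, total - money)
-- ===== Notes on version B (the rewrite author's own statement) =====
-- stated objective: faster
-- what changed: Replaces the O(count) subtraction loop by the closed-form triangular-number formula input_price*count*(count+1)//2 and a single max(0, total-money) clamp.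
import Mathlib
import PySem

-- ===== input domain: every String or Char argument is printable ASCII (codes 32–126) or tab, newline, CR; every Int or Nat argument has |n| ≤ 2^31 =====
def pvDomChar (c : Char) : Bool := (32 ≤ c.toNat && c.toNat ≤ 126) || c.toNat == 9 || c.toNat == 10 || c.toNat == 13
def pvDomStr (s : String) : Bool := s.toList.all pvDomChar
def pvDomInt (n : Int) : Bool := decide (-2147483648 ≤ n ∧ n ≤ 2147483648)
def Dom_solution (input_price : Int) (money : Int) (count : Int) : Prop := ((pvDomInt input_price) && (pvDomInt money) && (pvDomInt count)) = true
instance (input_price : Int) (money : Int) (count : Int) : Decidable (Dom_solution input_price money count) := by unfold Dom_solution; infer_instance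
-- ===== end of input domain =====

-- B replaces A's O(count) subtraction loop by the closed-form triangular sum, clamped at 0 (O(1)).

-- ===== PORT A =====
def solution (input_price : Int) (money : Int) (count : Int) : Int :=
  let money := (PySem.List.pyRange 1 (count + 1) 1).foldl
    (fun money i =>
      let price := input_price * i
      money - price) money
  if money < 0 then |money| else 0

-- ===== PORT B =====
def solution_alt (input_price : Int) (money : Int) (count : Int) : Int :=
  let c := if count > 0 then count else 0
  let total := input_price * (c * (c + 1) / 2)
  max 0 (total - money)

-- ===== PRECONDITION & SPEC =====
def Spec_solution (input_price : Int) (money : Int) (count : Int) (out : Int) : Prop := out = solution_alt input_price money count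
instance (input_price : Int) (money : Int) (count : Int) (out : Int) : Decidable (Spec_solution input_price money count out) := by unfold Spec_solution; infer_instance

-- ===== CLAIM (what is proved, stated in full; the proofs are below) =====
def Claim_equal_solution : Prop := ∀ (input_price : Int) (money : Int) (count : Int), Dom_solution input_price money count → Spec_solution input_price money count (solution input_price money count)

-- ===== LEMMAS AND PROOFS =====

-- Gauss step: T(n) + (n+1) = T(n+1) for the Int-division triangular numbers.
theorem pv_tri_step (n : Nat) :
    ((n : Int) * ((n : Int) + 1)) / 2 + ((n : Int) + 1)
      = (((n : Int) + 1) * (((n : Int) + 1) + 1)) / 2 := by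
  obtain ⟨k, hk⟩ := Int.even_mul_succ_self (n : Int)
  have h2 : ((n : Int) + 1) * (((n : Int) + 1) + 1)
      = (n : Int) * ((n : Int) + 1) + 2 * ((n : Int) + 1) := by ring
  set a := (n : Int) * ((n : Int) + 1) with ha
  set b := ((n : Int) + 1) * (((n : Int) + 1) + 1) with hb
  omega

-- The subtraction loop over range(1, n+1) equals subtracting p * T(n).
theorem pv_loop (p : Int) : ∀ (n : Nat) (m : Int),
    (PySem.List.pyRange 1 ((n : Int) + 1) 1).foldl (fun acc i => acc - p * i) m
      = m - p * ((n : Int) * ((n : Int) + 1) / 2) := by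
  intro n
  induction n with
  | zero =>
    intro m
    rw [PySem.List.pyRange_one_eq_nil (by norm_num)]
    simp
  | succ n ih =>
    intro m
    have hsplit : PySem.List.pyRange 1 (((n : Int) + 1) + 1) 1
        = PySem.List.pyRange 1 ((n : Int) + 1) 1 ++ [(n : Int) + 1] :=
      PySem.List.pyRange_one_succ_right (by omega)
    have hcast : ((n.succ : Nat) : Int) = (n : Int) + 1 := by push_cast; ring
    rw [hcast, hsplit, List.foldl_append, ih]
    simp only [List.foldl_cons, List.foldl_nil]
    rw [← pv_tri_step n, mul_add]
    ring

-- ===== VERDICT (by name: the statement is the Claim_ definition above) =====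
theorem solution_spec : Claim_equal_solution := by
  intro p m c _
  unfold Spec_solution solution solution_alt
  by_cases hc : c > 0
  · have hc0 : 0 ≤ c := le_of_lt hc
    have hfold := pv_loop p c.toNat m
    rw [Int.toNat_of_nonneg hc0] at hfold
    rw [hfold]
    dsimp only
    rw [if_pos hc]
    set T := c * (c + 1) / 2 with hT
    by_cases h : m - p * T < 0
    · rw [if_pos h, abs_of_neg h]; omega
    · rw [if_neg h]; omega
  · have hnil : PySem.List.pyRange 1 (c + 1) 1 = [] :=
      PySem.List.pyRange_one_eq_nil (by omega)
    rw [hnil]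
    dsimp only
    rw [if_neg hc]
    norm_num
    by_cases h : m < 0
    · rw [if_pos h, abs_of_neg h]; omega
    · rw [if_neg h]; omega
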